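-- pv_equiv track=rewrite | github.com/austral-prog/tp-6-loops-santinopesce00 | enumerate_list.py | enumerate_backwards
-- ===== SOURCE A (Python) =====
-- def enumerate_backwards(lst):
--     """
--     Igual que enumerate_list, pero cada palabra debe estar escrita al reves.
--     Los strings vacios se deben saltear.
--
--     Ejemplo: enumerate_backwards(["Red", "Green", ""]) -> ["0. deR", "1. neerG"]
--     """
--     lista = []
--     i = 0
--     for elemento in lst:
--         if elemento != "":
--             backwards = ""
--             for letras in elemento:
--                 backwards = letras + backwards
--             lista.append(f"{i}. {backwards}")
--             i = i + 1
--     return lista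
-- ===== SOURCE B (Python) =====
-- def enumerate_backwards(lst):
--     palabras = [p for p in lst if p != ""]
--     return [f"{i}. {p[::-1]}" for i, p in enumerate(palabras)]
-- ===== Notes on version B (the rewrite author's own statement) =====
-- stated objective: idiomatic
-- what changed: Replaces A's single interleaved pass (manual counter advanced only on non-empty words, inner character-prepend loop) with a filter pass followed by enumerate over the filtered list, reversing each word by slicing.
import Mathlib
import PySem

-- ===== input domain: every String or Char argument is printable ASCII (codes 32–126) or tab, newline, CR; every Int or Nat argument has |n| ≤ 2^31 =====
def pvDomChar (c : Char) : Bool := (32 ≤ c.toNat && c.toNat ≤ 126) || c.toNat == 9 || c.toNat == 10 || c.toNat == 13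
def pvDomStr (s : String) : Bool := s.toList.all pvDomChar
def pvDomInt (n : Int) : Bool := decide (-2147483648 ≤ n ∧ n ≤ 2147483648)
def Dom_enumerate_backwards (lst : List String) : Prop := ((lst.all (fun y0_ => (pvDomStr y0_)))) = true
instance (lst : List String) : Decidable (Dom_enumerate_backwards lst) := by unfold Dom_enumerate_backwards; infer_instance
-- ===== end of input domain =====

-- B filters the non-empty words first, then enumerates the filtered list and reverses each
-- word by slicing; A keeps one interleaved pass with a manual counter and an inner
-- character-prepend loop. Proved equal on the whole domain.

-- ===== PORT A =====
def enumerate_backwards (lst : List String) : List String :=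
  (lst.foldl (fun (st : List String × Int) elemento =>
      if elemento ≠ "" then
        let backwards := elemento.toList.foldl (fun b letras => String.singleton letras ++ b) ""
        (st.1 ++ [PySem.Int.toStr st.2 ++ ". " ++ backwards], st.2 + 1)
      else st) ([], 0)).1

-- ===== PORT B =====
def enumerate_backwards_alt (lst : List String) : List String :=
  let palabras := lst.filter (fun p => p ≠ "")
  (PySem.List.enumerate palabras 0).map
    (fun ip => PySem.Int.toStr ip.1 ++ ". " ++ ((PySem.Str.slice? ip.2 none none (-1)).getD ""))

-- ===== PRECONDITION & SPEC =====
def Spec_enumerate_backwards (lst : List String) (out : List String) : Prop := out = enumerate_backwards_alt lst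
instance (lst : List String) (out : List String) : Decidable (Spec_enumerate_backwards lst out) := by unfold Spec_enumerate_backwards; infer_instance

-- ===== CLAIM (what is proved, stated in full; the proofs are below) =====
def Claim_equal_enumerate_backwards : Prop := ∀ (lst : List String), Dom_enumerate_backwards lst → Spec_enumerate_backwards lst (enumerate_backwards lst)

-- ===== LEMMAS AND PROOFS =====

-- A's inner prepend loop reverses the word.
theorem pv_inner_rev (l : List Char) (b : String) :
    l.foldl (fun b c => String.singleton c ++ b) b = String.ofList l.reverse ++ b := by
  induction l generalizing b with
  | nil =>
      apply String.toList_injective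
      simp
  | cons c l ih =>
      simp only [List.foldl_cons, ih, List.reverse_cons]
      apply String.toList_injective
      simp

-- Loop invariant for A's fold: accumulated list and counter vs. B's enumerate over the filter.
theorem pv_loop (lst : List String) (acc : List String) (i : Int) :
    (lst.foldl (fun (st : List String × Int) elemento =>
      if elemento ≠ "" then
        let backwards := elemento.toList.foldl (fun b letras => String.singleton letras ++ b) ""
        (st.1 ++ [PySem.Int.toStr st.2 ++ ". " ++ backwards], st.2 + 1)
      else st) (acc, i)).1
    = acc ++ (PySem.List.enumerate (lst.filter (fun p => p ≠ "")) i).map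
        (fun ip => PySem.Int.toStr ip.1 ++ ". " ++ ((PySem.Str.slice? ip.2 none none (-1)).getD "")) := by
  induction lst generalizing acc i with
  | nil => simp [PySem.List.enumerate_nil]
  | cons e lst ih =>
      by_cases he : e = ""
      · simp only [List.foldl_cons]
        rw [if_neg (by simp [he]), List.filter_cons_of_neg (by simp [he]), ih]
      · simp only [List.foldl_cons]
        rw [if_pos he, List.filter_cons_of_pos (by simp [he]), ih, PySem.List.enumerate_cons]
        simp [pv_inner_rev, PySem.Str.slice?_none_none_neg_one]

-- ===== VERDICT (by name: the statement is the Claim_ definition above) =====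
theorem enumerate_backwards_spec : Claim_equal_enumerate_backwards := by
  intro lst _
  show enumerate_backwards lst = enumerate_backwards_alt lst
  unfold enumerate_backwards enumerate_backwards_alt
  exact pv_loop lst [] 0
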